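-- pv_equiv track=rewrite | github.com/CiscoDevNet/iOAM | scripts/config_generator/pot_config_util.py | is_lucas_prp
-- ===== SOURCE A (Python) =====
-- def is_lucas_prp(n, D):
--   P = 1
--   Q = (1-D) >> 2
--
--   # n+1 = 2**r*s where s is odd
--   s = n+1
--   r = 0
--   while s&1 == 0:
--     r += 1
--     s >>= 1
--
--   # calculate the bit reversal of (odd) s
--   # e.g. 19 (10011) <=> 25 (11001)
--   t = 0
--   while s > 0:
--     if s&1:
--       t += 1
--       s -= 1
--     else:
--       t <<= 1
--       s >>= 1
--
--   # use the same bit reversal process to calculate the sth Lucas number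
--   # keep track of q = Q**n as we go
--   U = 0
--   V = 2
--   q = 1
--   # mod_inv(2, n)
--   inv_2 = (n+1) >> 1
--   while t > 0:
--     if t&1 == 1:
--       # U, V of n+1
--       U, V = ((U + V) * inv_2)%n, ((D*U + V) * inv_2)%n
--       q = (q * Q)%n
--       t -= 1
--     else:
--       # U, V of n*2
--       U, V = (U * V)%n, (V * V - 2 * q)%n
--       q = (q * q)%n
--       t >>= 1
--
--   # double s until we have the 2**r*sth Lucas number
--   while r > 0:
--       U, V = (U * V)%n, (V * V - 2 * q)%n
--       q = (q * q)%n
--       r -= 1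
--
--   # primality check
--   # if n is prime, n divides the n+1st Lucas number, given the assumptions
--   return U == 0
-- ===== SOURCE B (Python) =====
-- def is_lucas_prp(n, D):
--   Q = (1 - D) >> 2
--   inv_2 = (n + 1) >> 1
--
--   # (U_k, V_k, q_k) of the Lucas chain, computed by recursive halving of k:
--   # chain(2m) doubles chain(m); chain(2m+1) doubles chain(m) then steps once.
--   def chain(k):
--     if k == 1:
--       return ((0 + 2) * inv_2) % n, ((D * 0 + 2) * inv_2) % n, (1 * Q) % n
--     U, V, q = chain(k >> 1)
--     U, V, q = (U * V) % n, (V * V - 2 * q) % n, (q * q) % n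
--     if k & 1:
--       U, V, q = ((U + V) * inv_2) % n, ((D * U + V) * inv_2) % n, (q * Q) % n
--     return U, V, q
--
--   U, _, _ = chain(n + 1)
--   return U == 0
-- ===== Notes on version B (the rewrite author's own statement) =====
-- stated objective: simpler
-- what changed: B replaces A's three loops (strip powers of two, build the bit-reversal of s, then an LSB-driven Lucas loop plus a final doubling loop) by one recursive function that halves n+1 directly, so the r/s extraction, the bit-reversal integer and the separate doubling loop all disappear.
-- outside the precondition, e.g. on is_lucas_prp(-6, 5): A returns True, B raises RecursionError; on is_lucas_prp(0, 5): A raises ZeroDivisionError, B raises ZeroDivisionError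
import Mathlib
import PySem

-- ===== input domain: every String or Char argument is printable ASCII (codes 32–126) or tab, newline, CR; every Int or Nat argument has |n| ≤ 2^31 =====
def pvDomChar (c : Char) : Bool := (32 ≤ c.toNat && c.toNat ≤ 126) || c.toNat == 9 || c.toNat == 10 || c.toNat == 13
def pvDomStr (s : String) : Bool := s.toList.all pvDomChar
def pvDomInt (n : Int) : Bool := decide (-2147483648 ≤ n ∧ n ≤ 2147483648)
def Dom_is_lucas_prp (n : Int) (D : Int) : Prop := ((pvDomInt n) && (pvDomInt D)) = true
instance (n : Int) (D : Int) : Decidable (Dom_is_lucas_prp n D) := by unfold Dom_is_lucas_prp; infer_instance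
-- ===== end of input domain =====

-- B replaces A's three loops (2-adic extraction, bit-reversal of s, LSB-driven Lucas
-- loop plus final doubling loop) by ONE recursive function that halves n+1 directly;
-- same per-step modular arithmetic.

-- the two Lucas state updates, shared verbatim by both Pythons
def pvDbl (n : Int) (st : Int × Int × Int) : Int × Int × Int :=
  (PySem.Int.mod (st.1 * st.2.1) n,
   PySem.Int.mod (st.2.1 * st.2.1 - 2 * st.2.2) n,
   PySem.Int.mod (st.2.2 * st.2.2) n)

def pvInc (n D Q inv2 : Int) (st : Int × Int × Int) : Int × Int × Int :=
  (PySem.Int.mod ((st.1 + st.2.1) * inv2) n,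
   PySem.Int.mod ((D * st.1 + st.2.1) * inv2) n,
   PySem.Int.mod (st.2.2 * Q) n)

-- ===== PORT A =====
-- A's r,s extraction loop (fuel covers every s ≠ 0; s = 0, i.e. n = -1, loops forever
-- in Python and is outside Pre_)
def pvExtract : Nat → Int → Int → Int × Int
  | 0, r, s => (r, s)
  | fuel+1, r, s =>
      if PySem.Int.mod s 2 == 0 then pvExtract fuel (r + 1) (PySem.Int.floordiv s 2)
      else (r, s)

-- the bit-reversal loop of A
def pvRev (s t : Int) : Int :=
  if h : 0 < s then
    if PySem.Int.mod s 2 == 1 then pvRev (s - 1) (t + 1)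
    else pvRev (PySem.Int.floordiv s 2) (2 * t)
  else t
termination_by s.toNat
decreasing_by
  · omega
  · simp only [PySem.Int.floordiv_eq_ediv_of_pos (by omega : (0:Int) < 2)]; omega

-- A's Lucas loop, consuming the bit-reversed t LSB-first
def pvLucT (n D Q inv2 : Int) (t : Int) (st : Int × Int × Int) : Int × Int × Int :=
  if h : 0 < t then
    if PySem.Int.mod t 2 == 1 then pvLucT n D Q inv2 (t - 1) (pvInc n D Q inv2 st)
    else pvLucT n D Q inv2 (PySem.Int.floordiv t 2) (pvDbl n st)
  else st
termination_by t.toNat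
decreasing_by
  · omega
  · simp only [PySem.Int.floordiv_eq_ediv_of_pos (by omega : (0:Int) < 2)]; omega

-- A's final doubling loop
def pvRLoop (n : Int) (r : Int) (st : Int × Int × Int) : Int × Int × Int :=
  if h : 0 < r then pvRLoop n (r - 1) (pvDbl n st) else st
termination_by r.toNat
decreasing_by omega

def is_lucas_prp (n : Int) (D : Int) : Bool :=
  let Q := PySem.Int.floordiv (1 - D) 4          -- (1-D) >> 2
  let rs := pvExtract ((n + 1).natAbs + 1) 0 (n + 1)
  let t := pvRev rs.2 0
  let inv2 := PySem.Int.floordiv (n + 1) 2       -- (n+1) >> 1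
  let st := pvLucT n D Q inv2 t (0, 2, 1)
  let st2 := pvRLoop n rs.1 st
  st2.1 == 0

-- ===== PORT B =====
-- B's recursive chain on k (Python's chain(k)); for k ≤ 0 the Python recursion never
-- terminates (outside Pre_), so the final branch returns a junk value there.
def pvChain (n D Q inv2 : Int) (k : Int) : Int × Int × Int :=
  if k = 1 then
    (PySem.Int.mod ((0 + 2) * inv2) n,
     PySem.Int.mod ((D * 0 + 2) * inv2) n,
     PySem.Int.mod (1 * Q) n)
  else if h : 1 < k then
    let st := pvDbl n (pvChain n D Q inv2 (PySem.Int.floordiv k 2))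
    if PySem.Int.mod k 2 == 1 then pvInc n D Q inv2 st else st
  else (0, 0, 0)
termination_by k.toNat
decreasing_by
  simp only [PySem.Int.floordiv_eq_ediv_of_pos (by omega : (0:Int) < 2)]; omega

def is_lucas_prp_alt (n : Int) (D : Int) : Bool :=
  let Q := PySem.Int.floordiv (1 - D) 4
  let inv2 := PySem.Int.floordiv (n + 1) 2
  (pvChain n D Q inv2 (n + 1)).1 == 0

-- ===== PRECONDITION & SPEC =====
-- Pre_ restricts to n ≥ 1, the natural domain of a primality test: A raises
-- ZeroDivisionError at n = 0, loops forever at n = -1, and for n ≤ -2 returns the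
-- accidental constant True from its loops all running empty, where B's recursive
-- halving of n+1 does not terminate.
def Pre_is_lucas_prp (n : Int) (D : Int) : Prop := 1 ≤ n
instance (n : Int) (D : Int) : Decidable (Pre_is_lucas_prp n D) := by unfold Pre_is_lucas_prp; infer_instance
def pvWitness_is_lucas_prp : Int × Int := (7, 5)

def Spec_is_lucas_prp (n : Int) (D : Int) (out : Bool) : Prop := out = is_lucas_prp_alt n D
instance (n : Int) (D : Int) (out : Bool) : Decidable (Spec_is_lucas_prp n D out) := by unfold Spec_is_lucas_prp; infer_instance

-- ===== CLAIM =====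
def Claim_equal_is_lucas_prp : Prop := ∀ (n : Int) (D : Int), Dom_is_lucas_prp n D → Pre_is_lucas_prp n D → Spec_is_lucas_prp n D (is_lucas_prp n D)

-- ===== LEMMAS AND PROOFS =====

theorem pvMod2 (a : Int) : PySem.Int.mod a 2 = a % 2 :=
  PySem.Int.mod_eq_emod_of_pos (by omega)

theorem pvDiv2 (a : Int) : PySem.Int.floordiv a 2 = a / 2 :=
  PySem.Int.floordiv_eq_ediv_of_pos (by omega)

-- A's loop on t as a list of operations (true = "add one" step, false = doubling step)
def pvOpsT (t : Int) : List Bool :=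
  if h : 0 < t then
    if PySem.Int.mod t 2 == 1 then true :: pvOpsT (t - 1)
    else false :: pvOpsT (PySem.Int.floordiv t 2)
  else []
termination_by t.toNat
decreasing_by
  · omega
  · simp only [PySem.Int.floordiv_eq_ediv_of_pos (by omega : (0:Int) < 2)]; omega

def pvApply (n D Q inv2 : Int) (ops : List Bool) (st : Int × Int × Int) : Int × Int × Int :=
  ops.foldl (fun st b => if b then pvInc n D Q inv2 st else pvDbl n st) st

-- the operation list A derives from s via the bit reversal, MSB-first over s
def pvConv (s : Int) : List Bool :=
  if h : 1 < s then
    if PySem.Int.mod s 2 == 1 then pvConv (PySem.Int.floordiv (s - 1) 2) ++ [false, true]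
    else pvConv (PySem.Int.floordiv s 2) ++ [false]
  else if s = 1 then [true] else []
termination_by s.toNat
decreasing_by
  · simp only [PySem.Int.floordiv_eq_ediv_of_pos (by omega : (0:Int) < 2)]; omega
  · simp only [PySem.Int.floordiv_eq_ediv_of_pos (by omega : (0:Int) < 2)]; omega

theorem pvLucT_eq_apply (n D Q inv2 t : Int) (st : Int × Int × Int) :
    pvLucT n D Q inv2 t st = pvApply n D Q inv2 (pvOpsT t) st := by
  fun_induction pvLucT n D Q inv2 t st with
  | case1 t st h hodd ih =>
      rw [pvOpsT]; rw [pvMod2] at hodd; simp only [beq_iff_eq] at hodd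
      simp [h, hodd, pvApply, ih]
  | case2 t st h hodd ih =>
      rw [pvOpsT]; rw [pvMod2] at hodd; simp only [beq_iff_eq] at hodd
      rw [pvDiv2] at ih
      simp [h, hodd, pvApply, ih]
  | case3 t st h => rw [pvOpsT]; simp [h, pvApply]

theorem pvExtract_props (fuel : Nat) (r s : Int) (hs : 1 ≤ s) (hf : s.natAbs < fuel) :
    (pvExtract fuel r s).2 % 2 = 1 ∧ 1 ≤ (pvExtract fuel r s).2 := by
  induction fuel generalizing r s with
  | zero => omega
  | succ fuel ih =>
      rw [pvExtract]
      by_cases hm : PySem.Int.mod s 2 == 0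
      · rw [if_pos hm, pvDiv2]
        rw [pvMod2, beq_iff_eq] at hm
        exact ih _ _ (by omega) (by omega)
      · rw [if_neg hm]
        rw [pvMod2, beq_iff_eq] at hm
        exact ⟨by omega, hs⟩

theorem pvOpsT_odd (t : Int) (h : 0 < t) (ho : t % 2 = 1) :
    pvOpsT t = true :: pvOpsT (t - 1) := by
  rw [pvOpsT, dif_pos h, pvMod2]; simp [ho]

theorem pvOpsT_even (t : Int) (h : 0 < t) (he : t % 2 = 0) :
    pvOpsT t = false :: pvOpsT (t / 2) := by
  rw [pvOpsT, dif_pos h, pvMod2, pvDiv2]; simp [he]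

theorem pvOpsT_base (t : Int) (h : ¬ 0 < t) : pvOpsT t = [] := by
  rw [pvOpsT, dif_neg h]

theorem pvRev_odd (s t : Int) (h : 0 < s) (ho : s % 2 = 1) :
    pvRev s t = pvRev (s - 1) (t + 1) := by
  rw [pvRev, dif_pos h, pvMod2]; simp [ho]

theorem pvRev_even (s t : Int) (h : 0 < s) (he : s % 2 = 0) :
    pvRev s t = pvRev (s / 2) (2 * t) := by
  rw [pvRev, dif_pos h, pvMod2, pvDiv2]; simp [he]

theorem pvRev_base (s t : Int) (h : ¬ 0 < s) : pvRev s t = t := by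
  rw [pvRev, dif_neg h]

theorem pvConv_odd (s : Int) (h : 1 < s) (ho : s % 2 = 1) :
    pvConv s = pvConv ((s - 1) / 2) ++ [false, true] := by
  rw [pvConv, dif_pos h, pvMod2, pvDiv2]; simp [ho]

theorem pvConv_even (s : Int) (h : 1 < s) (he : s % 2 = 0) :
    pvConv s = pvConv (s / 2) ++ [false] := by
  rw [pvConv, dif_pos h, pvMod2, pvDiv2]; simp [he]

theorem pvConv_one : pvConv 1 = [true] := by
  rw [pvConv]; simp

theorem pvOpsT_rev (s t : Int) (hs : 1 ≤ s) (ht : 2 ≤ t) (hte : t % 2 = 0) :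
    pvOpsT (pvRev s t) = pvConv s ++ pvOpsT t := by
  generalize hm : s.toNat = m
  induction m using Nat.strong_induction_on generalizing s t with
  | _ m ih =>
  by_cases ho : s % 2 = 1
  · by_cases h1 : s = 1
    · subst h1
      rw [pvRev_odd 1 t (by omega) (by decide), show (1 : Int) - 1 = 0 by ring,
        pvRev_base 0 (t + 1) (by omega),
        pvConv_one, pvOpsT_odd (t + 1) (by omega) (by omega)]
      simp
    · rw [pvRev_odd s t (by omega) ho, pvRev_even (s - 1) (t + 1) (by omega) (by omega),
        ih ((s - 1) / 2).toNat (by omega) _ _ (by omega) (by omega) (by omega) rfl,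
        show (2 : Int) * (t + 1) = 2 * t + 2 by ring,
        pvOpsT_even (2 * t + 2) (by omega) (by omega),
        show (2 * t + 2) / 2 = t + 1 by omega,
        pvOpsT_odd (t + 1) (by omega) (by omega),
        show t + 1 - 1 = t by ring,
        pvConv_odd s (by omega) ho]
      simp
  · rw [pvRev_even s t (by omega) (by omega),
      ih (s / 2).toNat (by omega) _ _ (by omega) (by omega) (by omega) rfl,
      pvOpsT_even (2 * t) (by omega) (by omega),
      show (2 * t) / 2 = t by omega,
      pvConv_even s (by omega) (by omega)]
    simp

theorem pvOpsT_rev0 (s : Int) (hs : 1 ≤ s) (hodd : s % 2 = 1) :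
    pvOpsT (pvRev s 0) = pvConv s := by
  by_cases h1 : s = 1
  · subst h1
    rw [pvRev_odd 1 0 (by omega) (by decide), show (1 : Int) - 1 = 0 by ring,
      pvRev_base 0 (0 + 1) (by omega), pvConv_one,
      pvOpsT_odd (0 + 1) (by omega) (by decide), show (0 : Int) + 1 - 1 = 0 by ring,
      pvOpsT_base 0 (by omega)]
  · rw [pvRev_odd s 0 (by omega) hodd,
      pvRev_even (s - 1) (0 + 1) (by omega) (by omega),
      show (2 : Int) * (0 + 1) = 2 by ring,
      pvOpsT_rev ((s - 1) / 2) 2 (by omega) (by omega) (by decide),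
      pvOpsT_even 2 (by omega) (by decide),
      show (2 : Int) / 2 = 1 by decide,
      pvOpsT_odd 1 (by omega) (by decide),
      show (1 : Int) - 1 = 0 by ring,
      pvOpsT_base 0 (by omega),
      pvConv_odd s (by omega) hodd]

theorem pvApply_append (n D Q inv2 : Int) (L1 L2 : List Bool) (st : Int × Int × Int) :
    pvApply n D Q inv2 (L1 ++ L2) st = pvApply n D Q inv2 L2 (pvApply n D Q inv2 L1 st) := by
  simp [pvApply, List.foldl_append]

-- B's recursive chain computes exactly the operation list A derives from s
theorem pvChain_conv (n D Q inv2 s : Int) (hs : 1 ≤ s) :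
    pvChain n D Q inv2 s = pvApply n D Q inv2 (pvConv s) (0, 2, 1) := by
  generalize hm : s.toNat = m
  induction m using Nat.strong_induction_on generalizing s with
  | _ m ih =>
  subst hm
  by_cases h1 : s = 1
  · subst h1
    rw [pvChain, pvConv_one]
    simp [pvApply, pvInc]
  · have hlt : 1 < s := by omega
    rw [pvChain, if_neg h1, dif_pos hlt, pvDiv2, pvMod2]
    by_cases ho : s % 2 = 1
    · rw [pvConv_odd s hlt ho, pvApply_append,
        ih (s / 2).toNat (by omega) (s / 2) (by omega) rfl,
        show (s - 1) / 2 = s / 2 by omega]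
      simp [ho, pvApply]
    · rw [pvConv_even s hlt (by omega), pvApply_append,
        ih (s / 2).toNat (by omega) (s / 2) (by omega) rfl]
      simp [ho, pvApply]

theorem pvChain_even (n D Q inv2 k : Int) (h : 2 ≤ k) (he : k % 2 = 0) :
    pvChain n D Q inv2 k = pvDbl n (pvChain n D Q inv2 (k / 2)) := by
  rw [pvChain, if_neg (by omega : ¬ k = 1), dif_pos (by omega : 1 < k), pvDiv2, pvMod2]
  simp [he]

theorem pvRLoop_zero (n : Int) (st : Int × Int × Int) : pvRLoop n 0 st = st := by
  rw [pvRLoop]; simp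

theorem pvRLoop_succ (n r : Int) (hr : 0 ≤ r) (st : Int × Int × Int) :
    pvRLoop n (r + 1) st = pvRLoop n r (pvDbl n st) := by
  rw [pvRLoop, dif_pos (by omega : 0 < r + 1)]
  simp

-- the r doublings undone by the extraction are exactly B's even halving steps
theorem pvExtract_chain (n D Q inv2 : Int) (fuel : Nat) (r s : Int)
    (hs : 1 ≤ s) (hr : 0 ≤ r) (hf : s.natAbs < fuel) :
    pvRLoop n (pvExtract fuel r s).1 (pvChain n D Q inv2 (pvExtract fuel r s).2)
      = pvRLoop n r (pvChain n D Q inv2 s) := by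
  induction fuel generalizing r s with
  | zero => omega
  | succ fuel ih =>
      rw [pvExtract]
      by_cases hm : PySem.Int.mod s 2 == 0
      · rw [if_pos hm, pvDiv2]
        rw [pvMod2, beq_iff_eq] at hm
        rw [ih (r + 1) (s / 2) (by omega) (by omega) (by omega),
          pvRLoop_succ n r hr, ← pvChain_even n D Q inv2 s (by omega) hm]
      · rw [if_neg hm]

-- ===== VERDICT (by name: the statement is the Claim_ definition above) =====
theorem is_lucas_prp_spec : Claim_equal_is_lucas_prp := by
  intro n D _ hpre
  unfold Pre_is_lucas_prp at hpre
  obtain ⟨ho, hp⟩ := pvExtract_props ((n + 1).natAbs + 1) 0 (n + 1) (by omega) (by omega)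
  unfold Spec_is_lucas_prp is_lucas_prp is_lucas_prp_alt
  simp only []
  rw [pvLucT_eq_apply, pvOpsT_rev0 _ hp ho,
    ← pvChain_conv n D (PySem.Int.floordiv (1 - D) 4) (PySem.Int.floordiv (n + 1) 2) _ hp,
    pvExtract_chain n D _ _ _ 0 (n + 1) (by omega) (by omega) (by omega),
    pvRLoop_zero]
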